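-- pv_equiv track=rewrite | github.com/sakuracg/Multilayer_null_model | 基于断边重连的2.5和3阶多层复杂网络零模型/ling_model.py | sub_edgesBigAndSmall
-- ===== SOURCE A (Python) =====
-- def sub_edgesBigAndSmall(edges_list1, edges_list2):
--     """两个边列表做差集"""
--     sub_edges = []
--     edges_all = edges_list1 + edges_list2
--     for x,y in edges_all:
--         if ((x,y) in edges_list1 or (y,x) in edges_list1) and ((x,y) in edges_list2 or (y,x) in edges_list2):
--             continue
--         else:
--             sub_edges.append((x,y))
--     return sub_edges
-- ===== SOURCE B (Python) =====
-- def sub_edgesBigAndSmall(edges_list1, edges_list2):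
--     """两个边列表做差集 — sort-and-merge: canonicalize each undirected edge to a
--     sorted pair, sort the distinct keys of each list, find the keys common to
--     both lists with a single two-pointer merge, then keep the edges whose
--     canonical key is not common."""
--     def canon(e):
--         x, y = e
--         return (x, y) if x <= y else (y, x)
--     k1 = sorted({canon(e) for e in edges_list1})
--     k2 = sorted({canon(e) for e in edges_list2})
--     common = set()
--     i = j = 0
--     while i < len(k1) and j < len(k2):
--         if k1[i] < k2[j]:
--             i += 1
--         elif k2[j] < k1[i]:
--             j += 1
--         else:
--             common.add(k1[i])
--             i += 1
--             j += 1
--     return [e for e in edges_list1 + edges_list2 if canon(e) not in common]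
-- ===== Notes on version B (the rewrite author's own statement) =====
-- stated objective: faster
-- what changed: Replaces A's per-edge quadratic scans of both lists (checking both orientations each time) by a sort-and-merge algorithm: each edge is canonicalized to a sorted pair, the distinct canonical keys of each list are sorted, a single two-pointer merge finds the keys common to both lists, and one filter pass over list1+list2 keeps edges whose key is not common.
import Mathlib
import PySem

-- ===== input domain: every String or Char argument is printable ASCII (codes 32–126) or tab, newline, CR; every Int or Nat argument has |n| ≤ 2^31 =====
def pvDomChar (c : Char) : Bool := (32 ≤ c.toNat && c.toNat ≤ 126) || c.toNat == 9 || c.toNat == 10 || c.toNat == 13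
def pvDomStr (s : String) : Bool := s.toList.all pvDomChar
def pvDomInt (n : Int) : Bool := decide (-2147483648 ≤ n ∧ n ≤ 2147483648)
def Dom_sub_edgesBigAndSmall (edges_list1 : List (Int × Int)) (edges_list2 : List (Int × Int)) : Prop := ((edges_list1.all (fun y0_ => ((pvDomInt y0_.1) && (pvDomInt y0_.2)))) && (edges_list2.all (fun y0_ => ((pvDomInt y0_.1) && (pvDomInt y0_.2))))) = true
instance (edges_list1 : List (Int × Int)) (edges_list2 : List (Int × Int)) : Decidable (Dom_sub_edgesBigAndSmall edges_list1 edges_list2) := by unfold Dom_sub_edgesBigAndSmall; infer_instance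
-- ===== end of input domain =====

-- B replaces A's quadratic per-edge list scans by canonical keys, sorted once per list,
-- and a single two-pointer merge that finds the keys common to both lists (faster, in a timing run).

-- ===== PORT A =====
-- A: one loop over edges_list1 + edges_list2, skipping edges present (in either
-- orientation) in BOTH lists; quadratic membership scans, transliterated.
def sub_edgesBigAndSmall (edges_list1 : List (Int × Int)) (edges_list2 : List (Int × Int)) : List (Int × Int) :=
  (edges_list1 ++ edges_list2).foldl
    (fun sub_edges xy =>
      if ((xy.1, xy.2) ∈ edges_list1 ∨ (xy.2, xy.1) ∈ edges_list1) ∧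
         ((xy.1, xy.2) ∈ edges_list2 ∨ (xy.2, xy.1) ∈ edges_list2) then
        sub_edges
      else
        sub_edges ++ [(xy.1, xy.2)])
    []

-- ===== PORT B =====
-- B: canonicalize each undirected edge to a sorted pair, sort the distinct keys of
-- each list (Python tuple order = lexicographic), intersect the two sorted key lists
-- with one two-pointer merge, then one filter pass over list1 + list2.
-- canon(e) of Source B
def pvCanon (e : Int × Int) : Int × Int := if e.1 ≤ e.2 then e else (e.2, e.1)

-- Python's '<' on int pairs: lexicographic (Mathlib's '<' on Prod is pointwise, so spelled out)
def pvLexLt (a b : Int × Int) : Bool :=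
  decide (a.1 < b.1) || (!decide (b.1 < a.1) && decide (a.2 < b.2))

-- the two-pointer while loop of Source B: the indices i, j become the suffixes of k1, k2
def pvMergeCommon : List (Int × Int) → List (Int × Int) → PySem.Set (Int × Int) → PySem.Set (Int × Int)
  | [], _, common => common
  | _ :: _, [], common => common
  | a :: s, b :: t, common =>
      if pvLexLt a b then pvMergeCommon s (b :: t) common
      else if pvLexLt b a then pvMergeCommon (a :: s) t common
      else pvMergeCommon s t (PySem.Set.add common a)
  termination_by s t _ => s.length + t.length

def sub_edgesBigAndSmall_alt (edges_list1 : List (Int × Int)) (edges_list2 : List (Int × Int)) : List (Int × Int) :=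
  -- sorted({canon(e) for e in …}): sorting a set by the (injective) lexicographic
  -- tuple order, so the result cannot depend on the set's iteration order
  let k1 := PySem.List.sorted2 (PySem.Set.ofList (edges_list1.map pvCanon)) Prod.fst Prod.snd false
  let k2 := PySem.List.sorted2 (PySem.Set.ofList (edges_list2.map pvCanon)) Prod.fst Prod.snd false
  let common := pvMergeCommon k1 k2 PySem.Set.empty
  -- 'common' is a set used only for membership below, never iterated
  (edges_list1 ++ edges_list2).filter (fun e => !(PySem.Set.contains common (pvCanon e)))

-- ===== PRECONDITION & SPEC =====
def Spec_sub_edgesBigAndSmall (edges_list1 : List (Int × Int)) (edges_list2 : List (Int × Int)) (out : List (Int × Int)) : Prop := out = sub_edgesBigAndSmall_alt edges_list1 edges_list2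
instance (edges_list1 : List (Int × Int)) (edges_list2 : List (Int × Int)) (out : List (Int × Int)) : Decidable (Spec_sub_edgesBigAndSmall edges_list1 edges_list2 out) := by unfold Spec_sub_edgesBigAndSmall; infer_instance

-- ===== CLAIM (what is proved, stated in full; the proofs are below) =====
def Claim_equal_sub_edgesBigAndSmall : Prop := ∀ (edges_list1 : List (Int × Int)) (edges_list2 : List (Int × Int)), Dom_sub_edgesBigAndSmall edges_list1 edges_list2 → Spec_sub_edgesBigAndSmall edges_list1 edges_list2 (sub_edgesBigAndSmall edges_list1 edges_list2)

-- ===== LEMMAS AND PROOFS =====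

theorem pvLexLt_iff (a b : Int × Int) :
    pvLexLt a b = true ↔ a.1 < b.1 ∨ (a.1 = b.1 ∧ a.2 < b.2) := by
  simp [pvLexLt]; omega

theorem pvCanon_swap (e : Int × Int) : pvCanon (e.2, e.1) = pvCanon e := by
  rcases e with ⟨a, b⟩
  simp only [pvCanon]
  split_ifs <;> (first | rfl | (simp only [Prod.mk.injEq]; omega))

theorem pvCanon_eq_iff (f e : Int × Int) :
    pvCanon f = pvCanon e ↔ f = e ∨ f = (e.2, e.1) := by
  rcases e with ⟨a, b⟩; rcases f with ⟨c, d⟩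
  simp only [pvCanon, Prod.mk.injEq]
  split_ifs <;> simp only [Prod.mk.injEq] <;> omega

-- membership through canonical keys: either orientation in l ↔ the canonical key occurs
theorem mem_canon_map (l : List (Int × Int)) (e : Int × Int) :
    pvCanon e ∈ l.map pvCanon ↔ (e.1, e.2) ∈ l ∨ (e.2, e.1) ∈ l := by
  rw [List.mem_map]
  constructor
  · rintro ⟨f, hf, hcf⟩
    rcases (pvCanon_eq_iff f e).1 hcf with h | h
    · left; rw [← h]; cases f; cases e; simp_all
    · right; rw [← h]; cases f; cases e; simp_all
  · rintro (h | h)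
    · exact ⟨(e.1, e.2), h, by cases e; rfl⟩
    · exact ⟨(e.2, e.1), h, pvCanon_swap e⟩

-- inserting a fresh element into a strictly lex-sorted list keeps it strictly lex-sorted
theorem pairwise_insertBy (x : Int × Int) (l : List (Int × Int))
    (hl : l.Pairwise (fun a b => pvLexLt a b = true)) (hx : x ∉ l) :
    (PySem.List.insertBy pvLexLt x l).Pairwise (fun a b => pvLexLt a b = true) := by
  induction l with
  | nil => simp [PySem.List.insertBy]
  | cons y ys ih =>
    rw [List.pairwise_cons] at hl
    simp only [PySem.List.insertBy]
    split_ifs with hxy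
    · -- x :: y :: ys
      refine List.Pairwise.cons ?_ (List.Pairwise.cons hl.1 hl.2)
      intro z hz
      rcases List.mem_cons.1 hz with rfl | hz'
      · exact hxy
      · have hyz := hl.1 z hz'
        rw [pvLexLt_iff] at hxy hyz ⊢
        rcases x with ⟨x1, x2⟩; rcases y with ⟨y1, y2⟩; rcases z with ⟨z1, z2⟩
        simp_all; omega
    · -- y :: insertBy x ys
      have hxne : x ≠ y := fun h => hx (h ▸ List.mem_cons_self ..)
      have hyx : pvLexLt y x = true := by
        rw [pvLexLt_iff]
        rw [pvLexLt_iff] at hxy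
        rcases x with ⟨x1, x2⟩; rcases y with ⟨y1, y2⟩
        simp_all [Prod.mk.injEq]; omega
      refine List.Pairwise.cons ?_ (ih hl.2 (fun h => hx (List.mem_cons_of_mem _ h)))
      intro z hz
      rcases (PySem.List.mem_insertBy pvLexLt x z ys).1 hz with rfl | hz'
      · exact hyx
      · exact hl.1 z hz'

theorem foldl_insertBy_pairwise (l : List (Int × Int)) (hnd : l.Nodup) :
    ∀ acc : List (Int × Int), acc.Pairwise (fun a b => pvLexLt a b = true) →
      (∀ x ∈ l, x ∉ acc) →
      (l.foldl (fun acc x => PySem.List.insertBy pvLexLt x acc) acc).Pairwise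
        (fun a b => pvLexLt a b = true) := by
  induction l with
  | nil => intro acc hacc _; simpa using hacc
  | cons x xs ih =>
    intro acc hacc hdisj
    rw [List.nodup_cons] at hnd
    refine ih hnd.2 _ (pairwise_insertBy x acc hacc (hdisj x (List.mem_cons_self ..))) ?_
    intro y hy hmem
    rcases (PySem.List.mem_insertBy pvLexLt x y acc).1 hmem with rfl | h
    · exact hnd.1 hy
    · exact hdisj y (List.mem_cons_of_mem _ hy) h

-- sorted(set(keys)) is strictly lex-increasing
theorem pairwise_sortedKeys (l : List (Int × Int)) :
    (PySem.List.sorted2 (PySem.Set.ofList (l.map pvCanon)) Prod.fst Prod.snd false).Pairwise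
      (fun a b => pvLexLt a b = true) := by
  show ((PySem.Set.ofList (l.map pvCanon)).foldl
      (fun acc x => PySem.List.insertBy pvLexLt x acc) []).Pairwise _
  exact foldl_insertBy_pairwise _ (PySem.Set.nodup_ofList _) [] (by simp) (by simp)

theorem mem_sortedKeys (l : List (Int × Int)) (e : Int × Int) :
    pvCanon e ∈ PySem.List.sorted2 (PySem.Set.ofList (l.map pvCanon)) Prod.fst Prod.snd false ↔
      (e.1, e.2) ∈ l ∨ (e.2, e.1) ∈ l := by
  rw [(PySem.List.sorted2_perm _ _ _ _).mem_iff, PySem.Set.mem_ofList, mem_canon_map]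

-- a strictly smaller element is not in a strictly lex-sorted list
theorem not_mem_of_lt_head (a b : Int × Int) (t : List (Int × Int))
    (hab : pvLexLt a b = true)
    (ht : (b :: t).Pairwise (fun x y => pvLexLt x y = true)) : a ∉ b :: t := by
  rw [List.pairwise_cons] at ht
  intro hmem
  rcases List.mem_cons.1 hmem with rfl | h
  · rw [pvLexLt_iff] at hab; rcases a with ⟨a1, a2⟩; dsimp only at hab; omega
  · have := ht.1 a h
    rw [pvLexLt_iff] at hab this
    rcases a with ⟨a1, a2⟩; rcases b with ⟨b1, b2⟩
    simp_all; omega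

-- the merge computes exactly the common keys of two strictly sorted lists
theorem mem_mergeCommon (z : Int × Int) :
    ∀ (s t : List (Int × Int)) (c : PySem.Set (Int × Int)),
      s.Pairwise (fun a b => pvLexLt a b = true) →
      t.Pairwise (fun a b => pvLexLt a b = true) →
      (z ∈ pvMergeCommon s t c ↔ z ∈ c ∨ (z ∈ s ∧ z ∈ t)) := by
  intro s t c hs ht
  induction s, t, c using pvMergeCommon.induct with
  | case1 t c => simp [pvMergeCommon]
  | case2 a s c => simp [pvMergeCommon]
  | case3 a s b t c hab ih =>
    rw [List.pairwise_cons] at hs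
    have hnot : a ∉ b :: t := not_mem_of_lt_head a b t hab ht
    rw [pvMergeCommon, if_pos hab, ih hs.2 ht]
    constructor
    · rintro (h | ⟨h1, h2⟩)
      · exact Or.inl h
      · exact Or.inr ⟨List.mem_cons_of_mem _ h1, h2⟩
    · rintro (h | ⟨h1, h2⟩)
      · exact Or.inl h
      · rcases List.mem_cons.1 h1 with rfl | h1'
        · exact absurd h2 hnot
        · exact Or.inr ⟨h1', h2⟩
  | case4 a s b t c hab hba ih =>
    rw [List.pairwise_cons] at ht
    have hnot : b ∉ a :: s := not_mem_of_lt_head b a s hba hs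
    rw [pvMergeCommon, if_neg (by simp [hab]), if_pos hba, ih hs ht.2]
    constructor
    · rintro (h | ⟨h1, h2⟩)
      · exact Or.inl h
      · exact Or.inr ⟨h1, List.mem_cons_of_mem _ h2⟩
    · rintro (h | ⟨h1, h2⟩)
      · exact Or.inl h
      · rcases List.mem_cons.1 h2 with rfl | h2'
        · exact absurd h1 hnot
        · exact Or.inr ⟨h1, h2'⟩
  | case5 a s b t c hab hba ih =>
    rw [List.pairwise_cons] at hs ht
    have heq : b = a := by
      have h1 : ¬ pvLexLt a b = true := by simp [hab]
      have h2 : ¬ pvLexLt b a = true := by simp [hba]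
      rw [pvLexLt_iff] at h1 h2
      rcases a with ⟨a1, a2⟩; rcases b with ⟨b1, b2⟩
      simp_all only [not_or, not_and, not_lt, Prod.mk.injEq]
      omega
    subst heq
    rw [pvMergeCommon, if_neg (by simp [hab]), if_neg (by simp [hba]), ih hs.2 ht.2]
    rw [PySem.Set.mem_add]
    constructor
    · rintro ((h | rfl) | ⟨h1, h2⟩)
      · exact Or.inl h
      · exact Or.inr ⟨List.mem_cons_self .., List.mem_cons_self ..⟩
      · exact Or.inr ⟨List.mem_cons_of_mem _ h1, List.mem_cons_of_mem _ h2⟩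
    · rintro (h | ⟨h1, h2⟩)
      · exact Or.inl (Or.inl h)
      · rcases List.mem_cons.1 h1 with rfl | h1'
        · exact Or.inl (Or.inr rfl)
        · rcases List.mem_cons.1 h2 with rfl | h2'
          · exact Or.inl (Or.inr rfl)
          · exact Or.inr ⟨h1', h2'⟩

-- A's loop is a filter of the concatenation
theorem foldA_eq_filter (l1 l2 : List (Int × Int)) :
    ∀ (l : List (Int × Int)) (acc : List (Int × Int)),
      l.foldl
        (fun sub_edges xy =>
          if ((xy.1, xy.2) ∈ l1 ∨ (xy.2, xy.1) ∈ l1) ∧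
             ((xy.1, xy.2) ∈ l2 ∨ (xy.2, xy.1) ∈ l2) then
            sub_edges
          else
            sub_edges ++ [(xy.1, xy.2)])
        acc
      = acc ++ l.filter
          (fun xy => !(decide (((xy.1, xy.2) ∈ l1 ∨ (xy.2, xy.1) ∈ l1) ∧
                               ((xy.1, xy.2) ∈ l2 ∨ (xy.2, xy.1) ∈ l2)))) := by
  intro l
  induction l with
  | nil => simp
  | cons a t ih =>
    intro acc
    rw [List.foldl_cons, List.filter_cons, ih]
    by_cases h : ((a.1, a.2) ∈ l1 ∨ (a.2, a.1) ∈ l1) ∧ ((a.1, a.2) ∈ l2 ∨ (a.2, a.1) ∈ l2)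
    · rw [if_pos h, if_neg (by simp [h])]
    · rw [if_neg h, if_pos (by simp [h])]
      simp

-- ===== VERDICT (by name: the statement is the Claim_ definition above) =====
theorem sub_edgesBigAndSmall_spec : Claim_equal_sub_edgesBigAndSmall := by
  intro l1 l2 _
  show sub_edgesBigAndSmall l1 l2 = sub_edgesBigAndSmall_alt l1 l2
  unfold sub_edgesBigAndSmall sub_edgesBigAndSmall_alt
  rw [foldA_eq_filter l1 l2 (l1 ++ l2) [], List.nil_append]
  apply List.filter_congr
  intro e _
  have hmem : pvCanon e ∈ pvMergeCommon
      (PySem.List.sorted2 (PySem.Set.ofList (l1.map pvCanon)) Prod.fst Prod.snd false)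
      (PySem.List.sorted2 (PySem.Set.ofList (l2.map pvCanon)) Prod.fst Prod.snd false)
      PySem.Set.empty ↔
      ((e.1, e.2) ∈ l1 ∨ (e.2, e.1) ∈ l1) ∧ ((e.1, e.2) ∈ l2 ∨ (e.2, e.1) ∈ l2) := by
    rw [mem_mergeCommon _ _ _ _ (pairwise_sortedKeys l1) (pairwise_sortedKeys l2),
        mem_sortedKeys, mem_sortedKeys]
    simp [PySem.Set.empty]
  rw [Bool.eq_iff_iff]
  simp only [Prod.mk.eta, PySem.Set.empty] at hmem
  simp [PySem.Set.contains, hmem]
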